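-- pv_equiv track=rewrite | github.com/MrBrantCode/unitest_baseline | mut_generate/mist_train_cf/cf_11513/solution.py | sum_of_previous_and_next_elements
-- ===== SOURCE A (Python) =====
-- def sum_of_previous_and_next_elements(lst):
--     if len(lst) == 0:
--         return []
--
--     result = []
--     for i in range(len(lst)):
--         previous = lst[i-1] if i > 0 else 0
--         next = lst[i+1] if i < len(lst)-1 else 0
--         result.append(previous + next)
--
--     return result
-- ===== SOURCE B (Python) =====
-- def sum_of_previous_and_next_elements(lst):
--     # Build the two shifted neighbor lists once and add them pairwise.
--     if not lst:
--         return []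
--     prev = [0] + lst[:-1]
--     nxt = lst[1:] + [0]
--     return [a + b for a, b in zip(prev, nxt)]
-- ===== Notes on version B (the rewrite author's own statement) =====
-- stated objective: alternative
-- what changed: Replaces A's index loop with per-index conditional neighbor lookups by building the two shifted neighbor lists ([0]+lst[:-1] and lst[1:]+[0]) once and adding them pairwise with zip.
import Mathlib
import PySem

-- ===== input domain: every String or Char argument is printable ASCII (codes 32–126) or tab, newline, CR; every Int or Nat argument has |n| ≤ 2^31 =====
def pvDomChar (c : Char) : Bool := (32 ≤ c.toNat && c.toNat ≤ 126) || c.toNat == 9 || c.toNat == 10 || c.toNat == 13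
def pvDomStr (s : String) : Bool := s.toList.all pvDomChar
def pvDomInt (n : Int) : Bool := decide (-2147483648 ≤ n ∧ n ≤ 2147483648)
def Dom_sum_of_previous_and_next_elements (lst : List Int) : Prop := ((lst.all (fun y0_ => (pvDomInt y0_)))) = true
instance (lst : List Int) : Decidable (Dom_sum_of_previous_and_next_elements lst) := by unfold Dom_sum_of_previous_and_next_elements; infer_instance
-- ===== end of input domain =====

-- B replaces A's per-index conditional neighbor lookups by two shifted lists added pairwise (alternative decomposition, same cost).

-- ===== PORT A =====
-- literal port of A: guard on empty, then a loop over range(len(lst)) appending previous+next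
def sum_of_previous_and_next_elements (lst : List Int) : List Int :=
  if (lst.length : Int) = 0 then []
  else
    (PySem.List.pyRange 0 (lst.length : Int) 1).foldl
      (fun result i =>
        let previous : Int := if i > 0 then PySem.List.pyGetD lst (i - 1) 0 else 0
        let next : Int := if i < (lst.length : Int) - 1 then PySem.List.pyGetD lst (i + 1) 0 else 0
        result ++ [previous + next]) []

-- ===== PORT B =====
-- from Source B: prev = [0] + lst[:-1], nxt = lst[1:] + [0], then zip and add pairwise
def sum_of_previous_and_next_elements_alt (lst : List Int) : List Int :=
  if lst = [] then []
  else
    let prev := 0 :: PySem.List.slice lst none (some (-1))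
    let nxt := PySem.List.slice lst (some 1) none ++ [0]
    (prev.zip nxt).map (fun p => p.1 + p.2)

-- ===== PRECONDITION & SPEC =====
def Spec_sum_of_previous_and_next_elements (lst : List Int) (out : List Int) : Prop := out = sum_of_previous_and_next_elements_alt lst
instance (lst : List Int) (out : List Int) : Decidable (Spec_sum_of_previous_and_next_elements lst out) := by unfold Spec_sum_of_previous_and_next_elements; infer_instance

-- ===== CLAIM (what is proved, stated in full; the proofs are below) =====
def Claim_equal_sum_of_previous_and_next_elements : Prop := ∀ (lst : List Int), Dom_sum_of_previous_and_next_elements lst → Spec_sum_of_previous_and_next_elements lst (sum_of_previous_and_next_elements lst)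

-- ===== LEMMAS AND PROOFS =====

theorem sum_of_previous_and_next_elements_spec : Claim_equal_sum_of_previous_and_next_elements := by
  intro lst _
  unfold Spec_sum_of_previous_and_next_elements sum_of_previous_and_next_elements
    sum_of_previous_and_next_elements_alt
  rcases eq_or_ne lst [] with hnil | hne
  · simp [hnil]
  · rw [if_neg hne]
    have hn : 0 < lst.length := List.length_pos_iff.mpr hne
    rw [if_neg (by simpa using hne)]
    rw [PySem.List.foldl_append_singleton_eq_map, PySem.List.pyRange_one]
    simp only [Int.sub_zero, Int.toNat_natCast, List.map_map,
      PySem.List.slice_to_neg_one, PySem.List.slice_from_one]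
    apply List.ext_getElem
    · simp; omega
    · intro j hj1 hj2
      have hj : j < lst.length := by simpa using hj1
      simp only [List.nil_append, List.getElem_map, Function.comp_apply, List.getElem_range,
        List.getElem_zip, Int.zero_add]
      refine congrArg₂ (· + ·) ?_ ?_
      · -- previous: (0 :: lst.dropLast)[j] matches A's guarded lst[j-1]
        cases j with
        | zero => simp
        | succ k =>
          have hk : k < lst.dropLast.length := by simp; omega
          have h1 : ((k:Int) + 1) - 1 = ((k : Nat) : Int) := by omega
          simp only [List.getElem_cons_succ, List.getElem_dropLast]
          rw [if_pos (by exact_mod_cast Nat.succ_pos k), Nat.cast_add, Nat.cast_one, h1,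
            PySem.List.pyGetD_natCast, List.getD_eq_getElem _ _ (by omega)]
      · -- next: (lst.tail ++ [0])[j] matches A's guarded lst[j+1]
        by_cases hlt : j < lst.length - 1
        · have hjt : j < lst.tail.length := by simp; omega
          have h1 : (j:Int) + 1 = ((j + 1 : Nat) : Int) := by omega
          rw [List.getElem_append_left hjt, List.getElem_tail,
            if_pos (by exact_mod_cast (by omega : (j:Int) < (lst.length:Int) - 1)), h1,
            PySem.List.pyGetD_natCast, List.getD_eq_getElem _ _ (by omega)]
        · have hje : j = lst.length - 1 := by omega
          have hge : lst.tail.length ≤ j := by simp; omega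
          rw [List.getElem_append_right hge,
            if_neg (by omega)]
          simp

-- ===== VERDICT (by name: the statement is the Claim_ definition above) =====
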